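-- pv_equiv track=rewrite | github.com/mohit-research/Pickle_Files_Swipe | slidingTrain_GAN_Tab.py | create_sliding_window
-- ===== SOURCE A (Python) =====
-- def create_sliding_window(X, Y, n):
--         final_X = []
--         final_Y = []
--         for i in range(len(X)- n):
--                 temp = []
--                 for j in range(i, i + n):
--                         temp += X[j]
--                 final_X.append(temp)
--                 final_Y.append(Y[i+n])
--         return final_X, final_Y
-- ===== SOURCE B (Python) =====
-- def create_sliding_window(X, Y, n):
--         m = len(X) - n
--         if m <= 0:
--                 return [], []
--         window = []
--         for row in X[:n]:
--                 window += row
--         final_X = []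
--         for i in range(m):
--                 final_X.append(window)
--                 window = (window + X[i + n])[len(X[i]):]
--         return final_X, Y[n:n + m]
-- ===== Notes on version B (the rewrite author's own statement) =====
-- stated objective: alternative
-- what changed: Instead of rebuilding each window by concatenating its n rows from scratch, B maintains one running flat window that it slides forward per step (append the new row, drop the old front row) and takes the targets as a single slice Y[n:n+m].
-- outside the precondition, e.g. on create_sliding_window([], [5], -1): A returns ([[]], [5]), B raises IndexError
import Mathlib
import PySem

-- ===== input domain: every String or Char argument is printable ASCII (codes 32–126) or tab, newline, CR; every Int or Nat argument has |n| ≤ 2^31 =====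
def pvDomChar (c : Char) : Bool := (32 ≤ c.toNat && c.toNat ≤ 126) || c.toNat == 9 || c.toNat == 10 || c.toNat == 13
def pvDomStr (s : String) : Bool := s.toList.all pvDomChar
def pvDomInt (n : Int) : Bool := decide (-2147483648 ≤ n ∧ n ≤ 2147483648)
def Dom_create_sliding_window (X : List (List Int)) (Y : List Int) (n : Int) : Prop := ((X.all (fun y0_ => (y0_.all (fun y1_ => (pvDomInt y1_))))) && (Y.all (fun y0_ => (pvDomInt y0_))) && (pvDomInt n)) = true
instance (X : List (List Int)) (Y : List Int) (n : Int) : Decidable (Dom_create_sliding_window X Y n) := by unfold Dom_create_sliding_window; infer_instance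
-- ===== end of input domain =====

-- B slides one running flat window (append the new row, drop the old front row) instead of
-- rebuilding each window from its n rows, and takes the targets as one slice of Y.

-- ===== PORT A =====
def create_sliding_window (X : List (List Int)) (Y : List Int) (n : Int) : List (List Int) × List Int :=
  (PySem.List.pyRange 0 ((X.length : Int) - n) 1).foldl
    (fun (acc : List (List Int) × List Int) i =>
      let temp := (PySem.List.pyRange i (i + n) 1).foldl
        (fun t j => t ++ PySem.List.pyGetD X j []) []
      (acc.1 ++ [temp], acc.2 ++ [PySem.List.pyGetD Y (i + n) 0]))
    ([], [])

-- ===== PORT B =====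
def create_sliding_window_alt (X : List (List Int)) (Y : List Int) (n : Int) : List (List Int) × List Int :=
  let m : Int := (X.length : Int) - n
  if m ≤ 0 then ([], [])
  else
    let window0 := (PySem.List.slice X none (some n)).foldl (fun w row => w ++ row) []
    let st := (PySem.List.pyRange 0 m 1).foldl
      (fun (st : List (List Int) × List Int) i =>
        (st.1 ++ [st.2],
         PySem.List.slice (st.2 ++ PySem.List.pyGetD X (i + n) [])
           (some (((PySem.List.pyGetD X i []).length : Int))) none))
      ([], window0)
    (st.1, PySem.List.slice Y (some n) (some (n + m)))

-- ===== PRECONDITION & SPEC =====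
-- Pre_ restricts to the natural domain n ≥ 0 (a negative window size only "works" in A via
-- accidental negative-index wraparound on Y, where B's algorithm raises) and excludes the
-- inputs where A raises IndexError (a window or target index beyond Y).
def Pre_create_sliding_window (X : List (List Int)) (Y : List Int) (n : Int) : Prop :=
  0 ≤ n ∧ ((X.length : Int) - n ≤ 0 ∨ (X.length : Int) ≤ (Y.length : Int))
instance (X : List (List Int)) (Y : List Int) (n : Int) : Decidable (Pre_create_sliding_window X Y n) := by unfold Pre_create_sliding_window; infer_instance

def pvWitness_create_sliding_window : List (List Int) × List Int × Int := ([[1, 2], [3], [4, 5]], [10, 20, 30], 1)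

def Spec_create_sliding_window (X : List (List Int)) (Y : List Int) (n : Int) (out : List (List Int) × List Int) : Prop := out = create_sliding_window_alt X Y n
instance (X : List (List Int)) (Y : List Int) (n : Int) (out : List (List Int) × List Int) : Decidable (Spec_create_sliding_window X Y n out) := by unfold Spec_create_sliding_window; infer_instance

-- ===== CLAIM (what is proved, stated in full; the proofs are below) =====
def Claim_equal_create_sliding_window : Prop := ∀ (X : List (List Int)) (Y : List Int) (n : Int), Dom_create_sliding_window X Y n → Pre_create_sliding_window X Y n → Spec_create_sliding_window X Y n (create_sliding_window X Y n)

-- ===== LEMMAS AND PROOFS =====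

def pvWin (X : List (List Int)) (nn k : Nat) : List Int := ((X.drop k).take nn).flatten

theorem step_win (X : List (List Int)) (nn k : Nat) (hk : k + nn < X.length) :
    PySem.List.slice (pvWin X nn k ++ PySem.List.pyGetD X ((k : Int) + (nn : Int)) [])
        (some (((PySem.List.pyGetD X (k : Int) []).length : Int))) none
      = pvWin X nn (k + 1) := by
  have hkl : k < X.length := by omega
  have hcast : (k : Int) + (nn : Int) = ((k + nn : Nat) : Int) := by push_cast; ring
  rw [hcast, PySem.List.pyGetD_natCast, PySem.List.pyGetD_natCast,
      PySem.List.slice_from_natCast]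
  have hgd1 : X.getD (k + nn) [] = X[k + nn] := List.getD_eq_getElem X [] hk
  have hgd2 : X.getD k [] = X[k] := List.getD_eq_getElem X [] hkl
  rw [hgd1, hgd2]
  have h1 : X.drop k = X[k] :: X.drop (k + 1) := List.drop_eq_getElem_cons hkl
  have h3 : (X.drop k).take (nn + 1) = (X.drop k).take nn ++ [X[k + nn]] := by
    rw [List.take_succ]
    congr
    rw [List.getElem?_drop]
    simp [List.getElem?_eq_getElem hk]
  have h2 : (X.drop k).take (nn + 1) = X[k] :: (X.drop (k + 1)).take nn := by
    rw [h1, List.take_succ_cons]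
  have hfl : pvWin X nn k ++ X[k + nn] = X[k] ++ pvWin X nn (k + 1) := by
    unfold pvWin
    rw [← List.flatten_concat, ← h3, h2]
    simp [List.flatten_cons]
  rw [hfl, List.drop_left]

theorem map_pyGetD_pyRange_take {α : Type} (xs : List α) (d : α) (a b : Int)
    (h0 : 0 ≤ a) (hab : a ≤ b) (hb : b ≤ (xs.length : Int)) :
    (PySem.List.pyRange a b 1).map (fun j => PySem.List.pyGetD xs j d)
      = (xs.drop a.toNat).take (b - a).toNat := by
  have hA := PySem.List.map_pyGetD_pyRange (xs := xs) (d := d) (a := a) h0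
  have hB := PySem.List.map_pyGetD_pyRange (xs := xs) (d := d) (a := b) (le_trans h0 hab)
  simp only [PySem.List.len] at hA hB
  have hsplit : PySem.List.pyRange a (xs.length : Int) 1
      = PySem.List.pyRange a b 1 ++ PySem.List.pyRange b (xs.length : Int) 1 :=
    PySem.List.pyRange_one_append a b _ hab hb
  rw [hsplit, List.map_append, hB] at hA
  have hlen : ((PySem.List.pyRange a b 1).map (fun j => PySem.List.pyGetD xs j d)).length = (b - a).toNat := by
    simp [PySem.List.length_pyRange_one]
  calc (PySem.List.pyRange a b 1).map (fun j => PySem.List.pyGetD xs j d)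
      = (((PySem.List.pyRange a b 1).map (fun j => PySem.List.pyGetD xs j d)) ++ xs.drop b.toNat).take (b - a).toNat := by
        rw [← hlen, List.take_left]
    _ = (xs.drop a.toNat).take (b - a).toNat := by rw [hA]


-- B's loop produces the successive windows (invariant: the running window at step k is pvWin X nn k)
lemma loopB (X : List (List Int)) (nn : Nat) :
    ∀ (m k : Nat) (acc : List (List Int)), k + m + nn = X.length →
    (PySem.List.pyRange (k : Int) ((k : Int) + (m : Int)) 1).foldl
        (fun (st : List (List Int) × List Int) i =>
          (st.1 ++ [st.2],
           PySem.List.slice (st.2 ++ PySem.List.pyGetD X (i + (nn : Int)) [])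
             (some (((PySem.List.pyGetD X i []).length : Int))) none))
        (acc, pvWin X nn k)
      = (acc ++ (List.range m).map (fun t => pvWin X nn (k + t)), pvWin X nn (k + m)) := by
  intro m
  induction m with
  | zero =>
    intro k acc h
    rw [show ((0 : Nat) : Int) = 0 by rfl, add_zero, PySem.List.pyRange_one_eq_nil le_rfl]
    simp
  | succ m ih =>
    intro k acc h
    have hlt : (k : Int) < (k : Int) + ((m + 1 : Nat) : Int) := by push_cast; omega
    rw [PySem.List.pyRange_one_cons hlt, List.foldl_cons]
    rw [step_win X nn k (by omega)]
    have hep : PySem.List.pyRange ((k : Int) + 1) ((k : Int) + ((m + 1 : Nat) : Int)) 1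
        = PySem.List.pyRange (((k + 1 : Nat) : Int)) (((k + 1 : Nat) : Int) + ((m : Nat) : Int)) 1 := by
      push_cast; ring_nf
    rw [hep, ih (k + 1) (acc ++ [pvWin X nn k]) (by omega)]
    have hmap : List.map (fun t => pvWin X nn (k + 1 + t)) (List.range m)
        = List.map (fun t => pvWin X nn (k + (t + 1))) (List.range m) :=
      List.map_congr_left (fun a _ => by rw [show k + 1 + a = k + (a + 1) by omega])
    rw [show k + 1 + m = k + (m + 1) by omega]
    simp [List.range_succ_eq_map, List.map_map, hmap, Function.comp_def, Nat.succ_eq_add_one]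

-- A's inner loop builds exactly the window starting at row i
lemma winA (X : List (List Int)) (n i : Int) (hn : 0 ≤ n) (h0 : 0 ≤ i)
    (hb : i + n ≤ (X.length : Int)) :
    (PySem.List.pyRange i (i + n) 1).foldl (fun t j => t ++ PySem.List.pyGetD X j []) []
      = pvWin X n.toNat i.toNat := by
  rw [PySem.List.foldl_append_eq_flatMap, List.nil_append, List.flatMap_def,
      map_pyGetD_pyRange_take X [] i (i + n) h0 (by omega) hb]
  rw [show (i + n - i) = n by ring]
  rfl

lemma A_char (X : List (List Int)) (Y : List Int) (n : Int) (hn : 0 ≤ n)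
    (hm : 0 < (X.length : Int) - n)
    (hY : (X.length : Int) ≤ (Y.length : Int)) :
    create_sliding_window X Y n
      = ((List.range ((X.length : Int) - n).toNat).map (fun k => pvWin X n.toNat k),
         ((Y.drop n.toNat).take ((X.length : Int) - n).toNat)) := by
  unfold create_sliding_window
  rw [PySem.List.foldl_prod_mk
      (f := fun (a : List (List Int)) (i : Int) =>
        a ++ [(PySem.List.pyRange i (i + n) 1).foldl (fun t j => t ++ PySem.List.pyGetD X j []) []])
      (g := fun (a : List Int) (i : Int) => a ++ [PySem.List.pyGetD Y (i + n) 0])]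
  rw [PySem.List.foldl_append_singleton_eq_map, PySem.List.foldl_append_singleton_eq_map,
      List.nil_append, List.nil_append]
  refine Prod.ext ?_ ?_
  · rw [PySem.List.pyRange_one 0 _, List.map_map]
    simp only [sub_zero]
    apply List.map_congr_left
    intro k hk
    have hk' : (k : Int) < (X.length : Int) - n := by
      have := List.mem_range.mp hk; omega
    simp only [Function.comp_apply]
    rw [zero_add, winA X n (k : Int) hn (by positivity) (by omega), Int.toNat_natCast]
  · have key := map_pyGetD_pyRange_take Y 0 n (X.length : Int) hn (by omega) hY
    rw [PySem.List.pyRange_one n _, List.map_map] at key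
    rw [PySem.List.pyRange_one 0 _, List.map_map]
    simp only [sub_zero]
    rw [← key, List.map_map]
    apply List.map_congr_left
    intro k hk
    simp only [Function.comp_apply]
    rw [zero_add, add_comm]

lemma B_char (X : List (List Int)) (Y : List Int) (n : Int) (hn : 0 ≤ n)
    (hm : 0 < (X.length : Int) - n) :
    create_sliding_window_alt X Y n
      = ((List.range ((X.length : Int) - n).toNat).map (fun k => pvWin X n.toNat k),
         ((Y.drop n.toNat).take ((X.length : Int) - n).toNat)) := by
  unfold create_sliding_window_alt
  simp only []
  rw [if_neg (by omega : ¬ ((X.length : Int) - n ≤ 0))]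
  have hn' : ((n.toNat : Nat) : Int) = n := Int.toNat_of_nonneg hn
  have hmm : ((((X.length : Int) - n).toNat : Nat) : Int) = (X.length : Int) - n :=
    Int.toNat_of_nonneg (le_of_lt hm)
  have hw0 : (PySem.List.slice X none (some n)).foldl (fun w row => w ++ row) []
      = pvWin X n.toNat 0 := by
    rw [PySem.List.slice_to X hn, PySem.List.foldl_append_eq_flatMap, List.nil_append]
    simp [pvWin, List.flatMap_def]
  rw [hw0]
  have hloop := loopB X n.toNat (((X.length : Int) - n).toNat) 0 [] (by omega)
  simp only [Nat.cast_zero, zero_add, List.nil_append] at hloop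
  rw [hn'] at hloop
  rw [hmm] at hloop
  rw [hloop]
  have hsl : PySem.List.slice Y (some n) (some (n + ((X.length : Int) - n)))
      = (Y.drop n.toNat).take ((X.length : Int) - n).toNat := by
    rw [PySem.List.slice_toNat Y hn (by omega)]
    congr 1
    omega
  rw [hsl]

-- ===== VERDICT (by name: the statement is the Claim_ definition above) =====
theorem create_sliding_window_spec : Claim_equal_create_sliding_window := by
  intro X Y n _ hpre
  obtain ⟨hn, hdis⟩ := hpre
  unfold Spec_create_sliding_window
  by_cases hm : (X.length : Int) - n ≤ 0
  · unfold create_sliding_window create_sliding_window_alt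
    rw [PySem.List.pyRange_one_eq_nil (by omega)]
    simp [hm]
  · have hm' : 0 < (X.length : Int) - n := by omega
    have hY : (X.length : Int) ≤ (Y.length : Int) := by
      rcases hdis with h | h
      · omega
      · exact h
    rw [A_char X Y n hn hm' hY, B_char X Y n hn hm']
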